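-- pv_equiv track=rewrite | github.com/ahyun39/CodingTest | 프로그래머스/3/92345. 사라지는 발판/사라지는 발판.py | solution
-- ===== SOURCE A (Python) =====
-- def solution(board, aloc, bloc):
--     n, m = len(board), len(board[0])
--     dirs = [(-1, 0), (1, 0), (0, -1), (0, 1)]
--
--     def dfs(r1, c1, r2, c2):
--
--         # 현재 플레이어가 움직일 수 있는지 확인
--         can_move = False
--         for dx, dy in dirs:
--             nx, ny = r1 + dx, c1 + dy
--             if 0 <= nx < n and 0 <= ny < m and board[nx][ny] == 1:
--                 can_move = True
--                 break
--         if not can_move or board[r1][c1] == 0: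
--             return (False, 0)
--
--         win_turns = []
--         lose_turns = []
--
--         for dx, dy in dirs:
--             nx, ny = r1 + dx, c1 + dy
--             if not (0 <= nx < n and 0 <= ny < m) or board[nx][ny] == 0:
--                 continue
--             board[r1][c1] = 0
--             is_win, turn_cnt = dfs(r2, c2, nx, ny)
--             board[r1][c1] = 1
--
--             if not is_win: # 상대방이 졌다면, 나는 이긴 것
--                 win_turns.append(turn_cnt + 1)
--             else:
--                 lose_turns.append(turn_cnt + 1)
--         if win_turns:
--             return (True, min(win_turns))
--         else:
--             return (False, max(lose_turns))
--     _, turn_cnt = dfs(aloc[0], aloc[1], bloc[0], bloc[1])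
--
--     return turn_cnt
-- ===== SOURCE B (Python) =====
-- def solution(board, aloc, bloc):
--     n, m = len(board), len(board[0])
--     memo = {}
--
--     # pure minimax with memoization over immutable board snapshots:
--     # a state is (board, current player, other player); no mutation anywhere
--     def dfs(bd, r1, c1, r2, c2):
--         key = (bd, r1, c1, r2, c2)
--         if key not in memo:
--             moves = [(r1 + dx, c1 + dy) for dx, dy in ((-1, 0), (1, 0), (0, -1), (0, 1))
--                      if 0 <= r1 + dx < n and 0 <= c1 + dy < m]
--             if not any(bd[x][y] == 1 for x, y in moves) or bd[r1][c1] == 0: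
--                 memo[key] = (False, 0)
--             else:
--                 rows = [list(row) for row in bd]
--                 rows[r1][c1] = 0
--                 nxt = tuple(map(tuple, rows))
--                 win, lose = None, None
--                 for x, y in moves:
--                     if bd[x][y] == 1:
--                         w, t = dfs(nxt, r2, c2, x, y)
--                         if not w:
--                             win = t + 1 if win is None else min(win, t + 1)
--                         else:
--                             lose = t + 1 if lose is None else max(lose, t + 1)
--                 memo[key] = (True, win) if win is not None else (False, lose)
--         return memo[key]
--
--     start = tuple(tuple(row) for row in board)
--     return dfs(start, aloc[0], aloc[1], bloc[0], bloc[1])[1]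
-- ===== Notes on version B (the rewrite author's own statement) =====
-- stated objective: alternative
-- what changed: B replaces A's mutate-and-restore DFS by a pure memoized minimax over immutable board snapshots: each state (board, positions) is computed once and cached, the in-range neighbour list is built once per call instead of bounds-tested in two separate direction loops, and two running min/max accumulators replace A's win/lose turn lists; …
-- outside the precondition, e.g. on solution([[2, 1], [2, 1]], [1, 0], [1, 1]): A returns 3, B returns 2; on solution([[1, 1], [1, 1]], [-1, 0], [0, 1]): A returns 2, B returns 2; on solution([[0, 0], [0]], [0, 0], [0, 0]): A returns 0, B returns 0
import Mathlib
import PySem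

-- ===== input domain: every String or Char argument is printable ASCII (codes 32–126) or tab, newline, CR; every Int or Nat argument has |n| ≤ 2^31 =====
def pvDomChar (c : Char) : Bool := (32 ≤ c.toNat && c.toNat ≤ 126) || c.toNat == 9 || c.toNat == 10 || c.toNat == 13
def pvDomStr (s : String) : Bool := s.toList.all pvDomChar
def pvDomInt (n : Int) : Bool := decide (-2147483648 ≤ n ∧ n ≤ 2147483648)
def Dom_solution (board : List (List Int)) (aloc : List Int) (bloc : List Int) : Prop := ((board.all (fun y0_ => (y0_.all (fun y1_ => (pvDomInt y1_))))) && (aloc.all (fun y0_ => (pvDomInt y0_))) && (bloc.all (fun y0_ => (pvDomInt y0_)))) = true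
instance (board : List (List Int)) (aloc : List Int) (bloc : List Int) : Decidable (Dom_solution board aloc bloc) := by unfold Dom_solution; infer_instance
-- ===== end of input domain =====

-- B is a pure memoized minimax over immutable board snapshots (DP on game states instead of
-- naive recursion with in-place mutate/restore); equal return value on every input Pre_
-- admits.  (A mutates `board` in place during the search — a side effect the caller can
-- observe; B never mutates — the claim proved here is about the return value only.)

-- shared primitives of both ports: Python's board[r][c] read / item assignment
-- (exact wherever Python returns a value; out-of-range IndexError is excluded by Pre_)
def pvCell (b : List (List Int)) (r c : Int) : Int :=
  PySem.List.pyGetD (PySem.List.pyGetD b r []) c 0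

def pvSetCell (b : List (List Int)) (r c v : Int) : List (List Int) :=
  PySem.List.pySetD b r (PySem.List.pySetD (PySem.List.pyGetD b r []) c v)

def pvDirs : List (Int × Int) := [(-1, 0), (1, 0), (0, -1), (0, 1)]

-- ===== PORT A =====
-- Python's dfs has no fuel; the Nat argument is the standard well-founded-recursion fuel,
-- started at board.flatten.length + 1, which exceeds the recursion depth (each recursive
-- step zeroes one more nonzero cell); sufficiency on Pre_ inputs follows from pvDfsA_stable.
def pvDfsA (fuel : Nat) (n m r1 c1 r2 c2 : Int) (b : List (List Int)) :
    (Bool × Int) × List (List Int) :=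
  match fuel with
  | 0 => ((false, 0), b)
  | fuel + 1 =>
    -- can_move: first-hit loop over dirs with break
    let canMove := pvDirs.any fun d =>
      decide (0 ≤ r1 + d.1 ∧ r1 + d.1 < n ∧ 0 ≤ c1 + d.2 ∧ c1 + d.2 < m) &&
        (pvCell b (r1 + d.1) (c1 + d.2) == 1)
    if !canMove || (pvCell b r1 c1 == 0) then ((false, 0), b)
    else
      -- for dx, dy in dirs: … collecting win_turns, lose_turns, threading the mutated board
      let st := pvDirs.foldl (fun (st : List Int × List Int × List (List Int)) d =>
        let nx := r1 + d.1
        let ny := c1 + d.2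
        if !(decide (0 ≤ nx ∧ nx < n ∧ 0 ≤ ny ∧ ny < m)) || (pvCell st.2.2 nx ny == 0) then st
        else
          let b1 := pvSetCell st.2.2 r1 c1 0
          let r := pvDfsA fuel n m r2 c2 nx ny b1
          let b3 := pvSetCell r.2 r1 c1 1
          if r.1.1 then (st.1, st.2.1 ++ [r.1.2 + 1], b3)
          else (st.1 ++ [r.1.2 + 1], st.2.1, b3)) ([], [], b)
      if !st.1.isEmpty then ((true, (PySem.List.min? st.1 (fun x => x)).getD 0), st.2.2)
      else ((false, (PySem.List.max? st.2.1 (fun x => x)).getD 0), st.2.2)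

def solution (board : List (List Int)) (aloc : List Int) (bloc : List Int) : Int :=
  let n : Int := (board.length : Int)
  let m : Int := ((PySem.List.pyGetD board 0 []).length : Int)
  (pvDfsA (board.flatten.length + 1) n m
    (PySem.List.pyGetD aloc 0 0) (PySem.List.pyGetD aloc 1 0)
    (PySem.List.pyGetD bloc 0 0) (PySem.List.pyGetD bloc 1 0) board).1.2

-- ===== PORT B =====
-- memo of the pure search: (board snapshot, r1, c1, r2, c2) ↦ (is_win, turns)
abbrev pvMemo : Type :=
  PySem.Dict (List (List Int) × Int × Int × Int × Int) (Bool × Int)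

def pvDfsB (fuel : Nat) (n m : Int) (bd : List (List Int)) (r1 c1 r2 c2 : Int)
    (memo : pvMemo) : (Bool × Int) × pvMemo :=
  match fuel with
  | 0 => ((false, 0), memo)
  | fuel + 1 =>
    let key := (bd, r1, c1, r2, c2)
    match PySem.Dict.get? memo key with
    | some v => (v, memo)
    | none =>
      -- the four in-range neighbour cells, computed once
      let moves := pvDirs.filterMap fun d =>
        if 0 ≤ r1 + d.1 ∧ r1 + d.1 < n ∧ 0 ≤ c1 + d.2 ∧ c1 + d.2 < m then
          some (r1 + d.1, c1 + d.2)
        else none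
      if !(moves.any fun p => pvCell bd p.1 p.2 == 1) || (pvCell bd r1 c1 == 0) then
        (((false, 0) : Bool × Int), PySem.Dict.insert memo key (false, 0))
      else
        -- nxt: the snapshot with the square the player stood on removed (no mutation of bd)
        let nxt := pvSetCell bd r1 c1 0
        -- scalar accumulators: fewest winning turns / most losing turns seen so far
        let st := moves.foldl
          (fun (st : Option Int × Option Int × pvMemo) p =>
            if pvCell bd p.1 p.2 == 1 then
              let r := pvDfsB fuel n m nxt r2 c2 p.1 p.2 st.2.2
              let t := r.1.2 + 1
              if r.1.1 then
                (st.1, some (match st.2.1 with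
                  | none => t
                  | some l => max l t), r.2)
              else
                (some (match st.1 with
                  | none => t
                  | some w => min w t), st.2.1, r.2)
            else st)
          (none, none, memo)
        let res : Bool × Int :=
          match st.1 with
          | some w => (true, w)
          | none => (false, st.2.1.getD 0)
        (res, PySem.Dict.insert st.2.2 key res)

def solution_alt (board : List (List Int)) (aloc : List Int) (bloc : List Int) : Int :=
  let n : Int := (board.length : Int)
  let m : Int := ((PySem.List.pyGetD board 0 []).length : Int)
  (pvDfsB (board.flatten.length + 1) n m board
    (PySem.List.pyGetD aloc 0 0) (PySem.List.pyGetD aloc 1 0)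
    (PySem.List.pyGetD bloc 0 0) (PySem.List.pyGetD bloc 1 0)
    PySem.Dict.empty).1.2

-- ===== PRECONDITION & SPEC =====
-- Pre_ admits the problem's domain: position lists of length ≥ 2, a nonempty board, and
-- either a start square none of whose four neighbours is on the board (A returns 0 before
-- reading any cell) or a rectangular 0/1 board with both start positions on the board.
-- Excluded inputs on which A still returns: boards with a cell value other than 0/1
-- (malformed for this puzzle — A's restore line writes 1 over any nonzero cell, so its
-- value there is an artefact of leftover mutation state), out-of-range or negative start
-- coordinates with an on-board neighbour (Python wraparound decides between a value and an
-- IndexError) and ragged boards, where raising depends on which cells the search touches.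
def Pre_solution (board : List (List Int)) (aloc : List Int) (bloc : List Int) : Prop :=
  board ≠ [] ∧ 2 ≤ aloc.length ∧ 2 ≤ bloc.length ∧
  ((¬(0 ≤ aloc.getD 0 0 - 1 ∧ aloc.getD 0 0 - 1 < (board.length : Int) ∧
      0 ≤ aloc.getD 1 0 ∧ aloc.getD 1 0 < ((board.headD []).length : Int)) ∧
    ¬(0 ≤ aloc.getD 0 0 + 1 ∧ aloc.getD 0 0 + 1 < (board.length : Int) ∧
      0 ≤ aloc.getD 1 0 ∧ aloc.getD 1 0 < ((board.headD []).length : Int)) ∧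
    ¬(0 ≤ aloc.getD 0 0 ∧ aloc.getD 0 0 < (board.length : Int) ∧
      0 ≤ aloc.getD 1 0 - 1 ∧ aloc.getD 1 0 - 1 < ((board.headD []).length : Int)) ∧
    ¬(0 ≤ aloc.getD 0 0 ∧ aloc.getD 0 0 < (board.length : Int) ∧
      0 ≤ aloc.getD 1 0 + 1 ∧ aloc.getD 1 0 + 1 < ((board.headD []).length : Int))) ∨
   ((∀ row ∈ board, row.length = (board.headD []).length) ∧
    (∀ row ∈ board, ∀ x ∈ row, x = 0 ∨ x = 1) ∧
    0 ≤ aloc.getD 0 0 ∧ aloc.getD 0 0 < (board.length : Int) ∧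
    0 ≤ aloc.getD 1 0 ∧ aloc.getD 1 0 < ((board.headD []).length : Int) ∧
    0 ≤ bloc.getD 0 0 ∧ bloc.getD 0 0 < (board.length : Int) ∧
    0 ≤ bloc.getD 1 0 ∧ bloc.getD 1 0 < ((board.headD []).length : Int)))

instance (board : List (List Int)) (aloc : List Int) (bloc : List Int) :
    Decidable (Pre_solution board aloc bloc) := by unfold Pre_solution; infer_instance

def pvWitness_solution : List (List Int) × List Int × List Int :=
  ([[1, 1], [1, 1]], [0, 0], [1, 1])

def Spec_solution (board : List (List Int)) (aloc : List Int) (bloc : List Int) (out : Int) :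
    Prop := out = solution_alt board aloc bloc

instance (board : List (List Int)) (aloc : List Int) (bloc : List Int) (out : Int) :
    Decidable (Spec_solution board aloc bloc out) := by unfold Spec_solution; infer_instance

-- ===== CLAIM (what is proved, stated in full; the proofs are below) =====
def Claim_equal_solution : Prop := ∀ (board : List (List Int)) (aloc : List Int) (bloc : List Int), Dom_solution board aloc bloc → Pre_solution board aloc bloc → Spec_solution board aloc bloc (solution board aloc bloc)

-- ===== LEMMAS AND PROOFS =====

-- Nat-indexed view of the board and the bookkeeping predicates used by the proofs
def pvCellN (b : List (List Int)) (i j : Nat) : Int := (b.getD i []).getD j 0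

def pvRect (n m : Int) (b : List (List Int)) : Prop :=
  (b.length : Int) = n ∧ ∀ row ∈ b, (row.length : Int) = m

def pvInR (n m r c : Int) : Prop := 0 ≤ r ∧ r < n ∧ 0 ≤ c ∧ c < m

-- all cells are 0 or 1
def pv01 (b : List (List Int)) : Prop := ∀ row ∈ b, ∀ x ∈ row, x = 0 ∨ x = 1

-- number of nonzero cells: the fuel measure
def pvNz (b : List (List Int)) : Nat := (b.map (fun row => row.countP (fun x => x ≠ 0))).sum

lemma pvCell_eq (b : List (List Int)) {r c : Int} (hr : 0 ≤ r) (hc : 0 ≤ c) :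
    pvCell b r c = pvCellN b r.toNat c.toNat := by
  simp [pvCell, pvCellN, PySem.List.pyGetD_of_nonneg _ _ hr, PySem.List.pyGetD_of_nonneg _ _ hc]

lemma pvSetCell_eq (b : List (List Int)) {r c : Int} (v : Int) (hr : 0 ≤ r) (hc : 0 ≤ c) :
    pvSetCell b r c v = b.set r.toNat ((b.getD r.toNat []).set c.toNat v) := by
  simp [pvSetCell, PySem.List.pySetD_of_nonneg _ _ hr, PySem.List.pySetD_of_nonneg _ _ hc,
    PySem.List.pyGetD_of_nonneg _ _ hr]

lemma pvRect_set {n m : Int} {b : List (List Int)} (h : pvRect n m b) (i j : Nat) (v : Int) :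
    pvRect n m (b.set i ((b.getD i []).set j v)) := by
  refine ⟨by rw [List.length_set]; exact h.1, ?_⟩
  by_cases hi : i < b.length
  · intro row hrow
    rcases List.mem_or_eq_of_mem_set hrow with hmem | rfl
    · exact h.2 _ hmem
    · rw [List.length_set, List.getD_eq_getElem _ _ hi]
      exact h.2 _ (List.getElem_mem hi)
  · rw [List.set_eq_of_length_le (le_of_not_gt hi)]; exact h.2

lemma pv01_set {b : List (List Int)} (h : pv01 b) (i j : Nat) {v : Int}
    (hv : v = 0 ∨ v = 1) : pv01 (b.set i ((b.getD i []).set j v)) := by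
  intro row hrow x hx
  rcases List.mem_or_eq_of_mem_set hrow with hmem | rfl
  · exact h _ hmem _ hx
  · rcases List.mem_or_eq_of_mem_set hx with hxm | rfl
    · by_cases hi : i < b.length
      · exact h _ (by rw [List.getD_eq_getElem _ _ hi]; exact List.getElem_mem hi) _ hxm
      · rw [List.getD_eq_default _ _ (le_of_not_gt hi)] at hxm
        cases hxm
    · exact hv

lemma sum_set_nat (l : List Nat) (i : Nat) (a : Nat) (h : i < l.length) :
    (l.set i a).sum + l[i] = l.sum + a := by
  have hl : l.sum = (List.take i l).sum + (l[i] + (List.drop (i+1) l).sum) := by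
    conv_lhs => rw [← List.take_append_drop i l, List.sum_append,
      List.drop_eq_getElem_cons h, List.sum_cons]
  rw [List.set_eq_take_append_cons_drop, if_pos h, List.sum_append, List.sum_cons]
  omega

lemma pvNz_set {b : List (List Int)} {i j : Nat} (hi : i < b.length)
    (hj : j < (b.getD i []).length) (v : Int) :
    pvNz (b.set i ((b.getD i []).set j v)) + (if ((b.getD i []).getD j 0) = 0 then 0 else 1)
      = pvNz b + (if v = 0 then 0 else 1) := by
  have hmap : pvNz (b.set i ((b.getD i []).set j v)) =
      ((b.map (fun row => row.countP (fun x => x ≠ 0))).set i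
        (((b.getD i []).set j v).countP (fun x => x ≠ 0))).sum := by
    unfold pvNz; rw [List.map_set]
  have hs := sum_set_nat (b.map (fun row => row.countP (fun x => x ≠ 0))) i
    (((b.getD i []).set j v).countP (fun x => x ≠ 0)) (by simpa using hi)
  have hcp := List.countP_set (p := fun x : Int => x ≠ 0) (l := b.getD i []) (a := v) hj
  have hget : (b.map (fun row => row.countP (fun x => x ≠ 0)))[i]'(by simpa using hi)
      = (b.getD i []).countP (fun x => x ≠ 0) := by
    rw [List.getElem_map, List.getD_eq_getElem _ _ hi]
  have hjj : (b.getD i [])[j] = (b.getD i []).getD j 0 := (List.getD_eq_getElem _ _ hj).symm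
  rw [hjj] at hcp
  rw [hmap]
  rw [hget] at hs
  unfold pvNz
  by_cases h0 : (b.getD i []).getD j 0 = 0
  · rw [if_pos h0]
    rw [if_neg (by simp only [decide_eq_true_eq]; omega)] at hcp
    by_cases hv : v = 0
    · rw [if_pos hv]; rw [if_neg (by simp only [decide_eq_true_eq]; omega)] at hcp; omega
    · rw [if_neg hv]; rw [if_pos (by simp only [decide_eq_true_eq]; omega)] at hcp; omega
  · have hpos : 1 ≤ (b.getD i []).countP (fun x => x ≠ 0) := by
      apply List.countP_pos_iff.2
      exact ⟨(b.getD i [])[j], List.getElem_mem hj,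
        by simp only [decide_eq_true_eq, hjj]; exact h0⟩
    rw [if_neg h0]
    rw [if_pos (by simp only [decide_eq_true_eq]; omega)] at hcp
    by_cases hv : v = 0
    · rw [if_pos hv]; rw [if_neg (by simp only [decide_eq_true_eq]; omega)] at hcp; omega
    · rw [if_neg hv]; rw [if_pos (by simp only [decide_eq_true_eq]; omega)] at hcp; omega

lemma pvNz_le_flatten (b : List (List Int)) : pvNz b ≤ b.flatten.length := by
  induction b with
  | nil => simp [pvNz]
  | cons r t ih =>
    simp only [pvNz, List.map_cons, List.sum_cons, List.flatten_cons, List.length_append]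
    have := List.countP_le_length (p := fun x : Int => x ≠ 0) (l := r)
    unfold pvNz at ih; omega

lemma pvBounds {n m r c : Int} {b : List (List Int)} (hR : pvRect n m b) (hI : pvInR n m r c) :
    r.toNat < b.length ∧ c.toNat < (b.getD r.toNat []).length := by
  obtain ⟨hlen, hrows⟩ := hR
  obtain ⟨h0, h1, h2, h3⟩ := hI
  have hb : r.toNat < b.length := by omega
  refine ⟨hb, ?_⟩
  have hmem : b.getD r.toNat [] ∈ b := by
    rw [List.getD_eq_getElem _ _ hb]; exact List.getElem_mem hb
  have hrow := hrows _ hmem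
  omega

-- under rect + 0/1 + in-range, every cell read is 0 or 1
lemma pv01_cell {n m r c : Int} {b : List (List Int)} (hR : pvRect n m b) (h01 : pv01 b)
    (hI : pvInR n m r c) : pvCell b r c = 0 ∨ pvCell b r c = 1 := by
  obtain ⟨hb, hrow⟩ := pvBounds hR hI
  rw [pvCell_eq b hI.1 hI.2.2.1, pvCellN, List.getD_eq_getElem _ _ hrow]
  refine h01 _ ?_ _ (List.getElem_mem hrow)
  rw [List.getD_eq_getElem _ _ hb]; exact List.getElem_mem hb

-- zero-then-restore-to-1 is the identity on a cell that held 1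
lemma pvSetCell_restore {n m r c : Int} {b : List (List Int)} (hR : pvRect n m b)
    (hI : pvInR n m r c) (h1 : pvCell b r c = 1) :
    pvSetCell (pvSetCell b r c 0) r c 1 = b := by
  obtain ⟨hb, hrow⟩ := pvBounds hR hI
  have hr := hI.1
  have hc := hI.2.2.1
  have hgd : (b.set r.toNat ((b.getD r.toNat []).set c.toNat 0)).getD r.toNat []
      = (b.getD r.toNat []).set c.toNat 0 := by
    rw [List.getD_eq_getElem _ _ (by simpa using hb)]
    simp [List.getElem_set_self]
  have hrowv : (b.getD r.toNat []).set c.toNat 1 = b.getD r.toNat [] := by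
    have h1' : (b.getD r.toNat [])[c.toNat] = 1 := by
      rw [pvCell_eq b hr hc, pvCellN, List.getD_eq_getElem _ _ hrow] at h1; exact h1
    rw [← h1']; exact List.set_getElem_self hrow
  have hbv : b.set r.toNat (b.getD r.toNat []) = b := by
    rw [List.getD_eq_getElem _ _ hb]; exact List.set_getElem_self hb
  rw [pvSetCell_eq b 0 hr hc, pvSetCell_eq _ 1 hr hc, hgd, List.set_set, List.set_set,
    hrowv, hbv]

-- the can_move test of A, and the skip/recurse step of A's move loop, as named functions
def pvCanMove (n m r1 c1 : Int) (b : List (List Int)) : Bool :=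
  pvDirs.any fun d =>
    decide (0 ≤ r1 + d.1 ∧ r1 + d.1 < n ∧ 0 ≤ c1 + d.2 ∧ c1 + d.2 < m) &&
      (pvCell b (r1 + d.1) (c1 + d.2) == 1)

def pvStepA (fuel : Nat) (n m r1 c1 r2 c2 : Int)
    (st : List Int × List Int × List (List Int)) (d : Int × Int) :
    List Int × List Int × List (List Int) :=
  if !(decide (0 ≤ r1 + d.1 ∧ r1 + d.1 < n ∧ 0 ≤ c1 + d.2 ∧ c1 + d.2 < m)) ||
      (pvCell st.2.2 (r1 + d.1) (c1 + d.2) == 0) then st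
  else
    let b1 := pvSetCell st.2.2 r1 c1 0
    let r := pvDfsA fuel n m r2 c2 (r1 + d.1) (c1 + d.2) b1
    let b3 := pvSetCell r.2 r1 c1 1
    if r.1.1 then (st.1, st.2.1 ++ [r.1.2 + 1], b3)
    else (st.1 ++ [r.1.2 + 1], st.2.1, b3)

lemma pvDfsA_succ (fuel : Nat) (n m r1 c1 r2 c2 : Int) (b : List (List Int)) :
    pvDfsA (fuel + 1) n m r1 c1 r2 c2 b =
      if !(pvCanMove n m r1 c1 b) || (pvCell b r1 c1 == 0) then ((false, 0), b)
      else
        if !(pvDirs.foldl (pvStepA fuel n m r1 c1 r2 c2) ([], [], b)).1.isEmpty then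
          ((true, (PySem.List.min? (pvDirs.foldl (pvStepA fuel n m r1 c1 r2 c2) ([], [], b)).1
              (fun x => x)).getD 0),
            (pvDirs.foldl (pvStepA fuel n m r1 c1 r2 c2) ([], [], b)).2.2)
        else
          ((false, (PySem.List.max? (pvDirs.foldl (pvStepA fuel n m r1 c1 r2 c2) ([], [], b)).2.1
              (fun x => x)).getD 0),
            (pvDirs.foldl (pvStepA fuel n m r1 c1 r2 c2) ([], [], b)).2.2) := rfl

lemma pvStepA_skip (fuel : Nat) {n m r1 c1 : Int} (r2 c2 : Int)
    {st : List Int × List Int × List (List Int)} {d : Int × Int}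
    (h : (!(decide (0 ≤ r1 + d.1 ∧ r1 + d.1 < n ∧ 0 ≤ c1 + d.2 ∧ c1 + d.2 < m)) ||
      (pvCell st.2.2 (r1 + d.1) (c1 + d.2) == 0)) = true) :
    pvStepA fuel n m r1 c1 r2 c2 st d = st := by
  unfold pvStepA; rw [if_pos h]

lemma pvStepA_go (fuel : Nat) {n m r1 c1 : Int} (r2 c2 : Int)
    {st : List Int × List Int × List (List Int)} {d : Int × Int}
    (h : ¬((!(decide (0 ≤ r1 + d.1 ∧ r1 + d.1 < n ∧ 0 ≤ c1 + d.2 ∧ c1 + d.2 < m)) ||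
      (pvCell st.2.2 (r1 + d.1) (c1 + d.2) == 0)) = true)) :
    pvStepA fuel n m r1 c1 r2 c2 st d =
      if (pvDfsA fuel n m r2 c2 (r1 + d.1) (c1 + d.2) (pvSetCell st.2.2 r1 c1 0)).1.1 then
        (st.1, st.2.1 ++ [(pvDfsA fuel n m r2 c2 (r1 + d.1) (c1 + d.2)
            (pvSetCell st.2.2 r1 c1 0)).1.2 + 1],
          pvSetCell (pvDfsA fuel n m r2 c2 (r1 + d.1) (c1 + d.2)
            (pvSetCell st.2.2 r1 c1 0)).2 r1 c1 1)
      else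
        (st.1 ++ [(pvDfsA fuel n m r2 c2 (r1 + d.1) (c1 + d.2)
            (pvSetCell st.2.2 r1 c1 0)).1.2 + 1], st.2.1,
          pvSetCell (pvDfsA fuel n m r2 c2 (r1 + d.1) (c1 + d.2)
            (pvSetCell st.2.2 r1 c1 0)).2 r1 c1 1) := by
  unfold pvStepA; rw [if_neg h]

lemma pvFoldl_inv {α β : Type} (f : α → β → α) (P : α → Prop)
    (h : ∀ a b, P a → P (f a b)) : ∀ (l : List β) (a : α), P a → P (List.foldl f a l) := by
  intro l
  induction l with
  | nil => intro a ha; exact ha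
  | cons x t ih => intro a ha; exact ih _ (h a x ha)

-- guard analysis: in the else-branch the standing cell is nonzero
lemma pvGuardCell {n m r1 c1 : Int} {b : List (List Int)} (hI1 : pvInR n m r1 c1)
    (hguard : ¬((!(pvCanMove n m r1 c1 b) || (pvCell b r1 c1 == 0)) = true)) :
    pvCellN b r1.toNat c1.toNat ≠ 0 := by
  have : ¬(pvCell b r1 c1 = 0) := by
    intro h; apply hguard; simp [h]
  rwa [pvCell_eq b hI1.1 hI1.2.2.1] at this

-- on a rect 0/1 board the guard forces the standing cell to hold 1
lemma pvGuardCell1 {n m r1 c1 : Int} {b : List (List Int)} (hR : pvRect n m b)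
    (h01 : pv01 b) (hI1 : pvInR n m r1 c1)
    (hguard : ¬((!(pvCanMove n m r1 c1 b) || (pvCell b r1 c1 == 0)) = true)) :
    pvCell b r1 c1 = 1 := by
  have hne := pvGuardCell hI1 hguard
  rw [← pvCell_eq b hI1.1 hI1.2.2.1] at hne
  rcases pv01_cell hR h01 hI1 with h | h
  · exact absurd h hne
  · exact h

-- facts about zeroing the standing cell (guard passed: cell = 1)
lemma pvMoveFacts {n m r1 c1 : Int} {b : List (List Int)} (hR : pvRect n m b)
    (h01 : pv01 b) (hI1 : pvInR n m r1 c1) (h1 : pvCell b r1 c1 = 1) :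
    pvRect n m (pvSetCell b r1 c1 0) ∧ pv01 (pvSetCell b r1 c1 0) ∧
    pvNz (pvSetCell b r1 c1 0) + 1 = pvNz b := by
  have hbd := pvBounds hR hI1
  have hb1eq := pvSetCell_eq b (r := r1) (c := c1) 0 hI1.1 hI1.2.2.1
  refine ⟨by rw [hb1eq]; exact pvRect_set hR _ _ _,
    by rw [hb1eq]; exact pv01_set h01 _ _ (Or.inl rfl), ?_⟩
  have := pvNz_set hbd.1 hbd.2 (0 : Int)
  rw [pvCell_eq b hI1.1 hI1.2.2.1, pvCellN] at h1
  rw [if_neg (by omega), if_pos rfl] at this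
  rw [hb1eq]; omega

-- ===== A is pure: dfs restores the board exactly (0/1 boards) =====
lemma pvDfsA_pure : ∀ (fuel : Nat) {n m r1 c1 r2 c2 : Int} {b : List (List Int)},
    pvRect n m b → pv01 b → pvInR n m r1 c1 → pvInR n m r2 c2 → pvNz b < fuel →
    (pvDfsA fuel n m r1 c1 r2 c2 b).2 = b := by
  intro fuel
  induction fuel with
  | zero => intro n m r1 c1 r2 c2 b _ _ _ _ hf; omega
  | succ fuel ih =>
    intro n m r1 c1 r2 c2 b hR h01 hI1 hI2 hf
    rw [pvDfsA_succ]
    by_cases hguard : (!(pvCanMove n m r1 c1 b) || (pvCell b r1 c1 == 0)) = true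
    · rw [if_pos hguard]
    · rw [if_neg hguard]
      have h1 := pvGuardCell1 hR h01 hI1 hguard
      obtain ⟨hR1, h011, hNz1⟩ := pvMoveFacts hR h01 hI1 h1
      have hstep : ∀ st d, (st : List Int × List Int × List (List Int)).2.2 = b →
          (pvStepA fuel n m r1 c1 r2 c2 st d).2.2 = b := by
        intro st d hst
        by_cases hskip : (!(decide (0 ≤ r1 + d.1 ∧ r1 + d.1 < n ∧ 0 ≤ c1 + d.2 ∧
            c1 + d.2 < m)) || (pvCell st.2.2 (r1 + d.1) (c1 + d.2) == 0)) = true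
        · rw [pvStepA_skip fuel r2 c2 hskip]; exact hst
        · rw [pvStepA_go fuel r2 c2 hskip]
          have hrange : 0 ≤ r1 + d.1 ∧ r1 + d.1 < n ∧ 0 ≤ c1 + d.2 ∧ c1 + d.2 < m := by
            by_contra hc; apply hskip; simp [hc]
          rw [hst]
          have hrec := ih (b := pvSetCell b r1 c1 0) hR1 h011 hI2
            ⟨hrange.1, hrange.2.1, hrange.2.2.1, hrange.2.2.2⟩ (by omega)
          rw [hrec]
          have hres := pvSetCell_restore hR hI1 h1
          split_ifs <;> simpa using hres
      have hfin := pvFoldl_inv _ (fun st => st.2.2 = b) hstep pvDirs ([], [], b) rfl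
      split_ifs <;> exact hfin

-- stability: any sufficient fuel computes the same value as any other
lemma pvDfsA_stable : ∀ (fuel fuel' : Nat) {n m r1 c1 r2 c2 : Int} {b : List (List Int)},
    pvRect n m b → pv01 b → pvInR n m r1 c1 → pvInR n m r2 c2 →
    pvNz b < fuel → pvNz b < fuel' →
    pvDfsA fuel' n m r1 c1 r2 c2 b = pvDfsA fuel n m r1 c1 r2 c2 b := by
  intro fuel
  induction fuel with
  | zero => intro fuel' n m r1 c1 r2 c2 b _ _ _ _ hf _; omega
  | succ fuel ih =>
    intro fuel' n m r1 c1 r2 c2 b hR h01 hI1 hI2 hf hf'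
    obtain ⟨fuel'', rfl⟩ : ∃ k, fuel' = k + 1 := ⟨fuel' - 1, by omega⟩
    rw [pvDfsA_succ, pvDfsA_succ]
    by_cases hguard : (!(pvCanMove n m r1 c1 b) || (pvCell b r1 c1 == 0)) = true
    · rw [if_pos hguard, if_pos hguard]
    · rw [if_neg hguard, if_neg hguard]
      have h1 := pvGuardCell1 hR h01 hI1 hguard
      obtain ⟨hR1, h011, hNz1⟩ := pvMoveFacts hR h01 hI1 h1
      have aux : ∀ (l : List (Int × Int)) (st : List Int × List Int × List (List Int)),
          st.2.2 = b →
          List.foldl (pvStepA fuel'' n m r1 c1 r2 c2) st l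
            = List.foldl (pvStepA fuel n m r1 c1 r2 c2) st l := by
        intro l
        induction l with
        | nil => intro st _; rfl
        | cons d t iht =>
          intro st hst
          simp only [List.foldl_cons]
          by_cases hskip : (!(decide (0 ≤ r1 + d.1 ∧ r1 + d.1 < n ∧ 0 ≤ c1 + d.2 ∧ c1 + d.2 < m))
              || (pvCell st.2.2 (r1 + d.1) (c1 + d.2) == 0)) = true
          · rw [pvStepA_skip fuel'' r2 c2 hskip, pvStepA_skip fuel r2 c2 hskip]
            exact iht st hst
          · rw [pvStepA_go fuel'' r2 c2 hskip, pvStepA_go fuel r2 c2 hskip]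
            have hrange : 0 ≤ r1 + d.1 ∧ r1 + d.1 < n ∧ 0 ≤ c1 + d.2 ∧ c1 + d.2 < m := by
              by_contra hc; apply hskip; simp [hc]
            rw [hst]
            have hIm : pvInR n m (r1 + d.1) (c1 + d.2) :=
              ⟨hrange.1, hrange.2.1, hrange.2.2.1, hrange.2.2.2⟩
            have hEq := ih fuel'' (b := pvSetCell b r1 c1 0) hR1 h011 hI2 hIm
              (by omega) (by omega)
            rw [hEq]
            have hrec := pvDfsA_pure fuel (b := pvSetCell b r1 c1 0) hR1 h011 hI2 hIm (by omega)
            have hres := pvSetCell_restore hR hI1 h1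
            split_ifs with hwin
            · refine iht _ ?_
              show pvSetCell _ r1 c1 1 = b
              rw [hrec]; exact hres
            · refine iht _ ?_
              show pvSetCell _ r1 c1 1 = b
              rw [hrec]; exact hres
      rw [aux pvDirs ([], [], b) rfl]

-- B-side: the precomputed move list, the loop step of B, and unfolding lemmas
def pvMoves (n m r1 c1 : Int) : List (Int × Int) :=
  pvDirs.filterMap fun d =>
    if 0 ≤ r1 + d.1 ∧ r1 + d.1 < n ∧ 0 ≤ c1 + d.2 ∧ c1 + d.2 < m then
      some (r1 + d.1, c1 + d.2)
    else none

def pvStepB (fuel : Nat) (n m : Int) (bd nxt : List (List Int)) (r2 c2 : Int)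
    (st : Option Int × Option Int × pvMemo) (p : Int × Int) :
    Option Int × Option Int × pvMemo :=
  if pvCell bd p.1 p.2 == 1 then
    let r := pvDfsB fuel n m nxt r2 c2 p.1 p.2 st.2.2
    let t := r.1.2 + 1
    if r.1.1 then
      (st.1, some (match st.2.1 with
        | none => t
        | some l => max l t), r.2)
    else
      (some (match st.1 with
        | none => t
        | some w => min w t), st.2.1, r.2)
  else st

lemma pvDfsB_hit (fuel : Nat) {n m r1 c1 r2 c2 : Int} {bd : List (List Int)} {memo : pvMemo}
    {v : Bool × Int}
    (h : PySem.Dict.get? memo (bd, r1, c1, r2, c2) = some v) :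
    pvDfsB (fuel + 1) n m bd r1 c1 r2 c2 memo = (v, memo) := by
  unfold pvDfsB; simp only [h]

lemma pvDfsB_miss_stop (fuel : Nat) {n m r1 c1 r2 c2 : Int} {bd : List (List Int)}
    {memo : pvMemo}
    (h : PySem.Dict.get? memo (bd, r1, c1, r2, c2) = none)
    (hg : (!((pvMoves n m r1 c1).any fun p => pvCell bd p.1 p.2 == 1) ||
      (pvCell bd r1 c1 == 0)) = true) :
    pvDfsB (fuel + 1) n m bd r1 c1 r2 c2 memo
      = ((false, 0), PySem.Dict.insert memo (bd, r1, c1, r2, c2) (false, 0)) := by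
  unfold pvMoves at hg
  unfold pvDfsB
  simp only [h]
  rw [if_pos hg]

def pvOutB (st : Option Int × Option Int × pvMemo) : Bool × Int :=
  match st.1 with
  | some w => (true, w)
  | none => (false, st.2.1.getD 0)

lemma pvDfsB_miss_go (fuel : Nat) {n m r1 c1 r2 c2 : Int} {bd : List (List Int)}
    {memo : pvMemo}
    (h : PySem.Dict.get? memo (bd, r1, c1, r2, c2) = none)
    (hg : ¬((!((pvMoves n m r1 c1).any fun p => pvCell bd p.1 p.2 == 1) ||
      (pvCell bd r1 c1 == 0)) = true)) :
    pvDfsB (fuel + 1) n m bd r1 c1 r2 c2 memo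
      = (pvOutB (List.foldl (pvStepB fuel n m bd (pvSetCell bd r1 c1 0) r2 c2)
            (none, none, memo) (pvMoves n m r1 c1)),
         PySem.Dict.insert (List.foldl (pvStepB fuel n m bd (pvSetCell bd r1 c1 0) r2 c2)
            (none, none, memo) (pvMoves n m r1 c1)).2.2 (bd, r1, c1, r2, c2)
          (pvOutB (List.foldl (pvStepB fuel n m bd (pvSetCell bd r1 c1 0) r2 c2)
            (none, none, memo) (pvMoves n m r1 c1)))) := by
  unfold pvMoves at hg ⊢
  unfold pvDfsB pvOutB
  simp only [h]
  rw [if_neg hg]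
  rfl

lemma pvStepB_skip (fuel : Nat) {n m : Int} {bd : List (List Int)} (nxt : List (List Int))
    (r2 c2 : Int) {st : Option Int × Option Int × pvMemo} {p : Int × Int}
    (h : ¬((pvCell bd p.1 p.2 == 1) = true)) :
    pvStepB fuel n m bd nxt r2 c2 st p = st := by
  unfold pvStepB; rw [if_neg h]

lemma pvStepB_go (fuel : Nat) {n m : Int} {bd : List (List Int)} (nxt : List (List Int))
    (r2 c2 : Int) {st : Option Int × Option Int × pvMemo} {p : Int × Int}
    (h : (pvCell bd p.1 p.2 == 1) = true) :
    pvStepB fuel n m bd nxt r2 c2 st p =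
      if (pvDfsB fuel n m nxt r2 c2 p.1 p.2 st.2.2).1.1 then
        (st.1, some (match st.2.1 with
          | none => (pvDfsB fuel n m nxt r2 c2 p.1 p.2 st.2.2).1.2 + 1
          | some l => max l ((pvDfsB fuel n m nxt r2 c2 p.1 p.2 st.2.2).1.2 + 1)),
          (pvDfsB fuel n m nxt r2 c2 p.1 p.2 st.2.2).2)
      else
        (some (match st.1 with
          | none => (pvDfsB fuel n m nxt r2 c2 p.1 p.2 st.2.2).1.2 + 1
          | some w => min w ((pvDfsB fuel n m nxt r2 c2 p.1 p.2 st.2.2).1.2 + 1)), st.2.1,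
          (pvDfsB fuel n m nxt r2 c2 p.1 p.2 st.2.2).2) := by
  unfold pvStepB; rw [if_pos h]

lemma pvAny_filterMap {α β : Type} (P : α → Prop) [DecidablePred P] (f : α → β)
    (q : β → Bool) : ∀ l : List α,
    ((l.filterMap fun a => if P a then some (f a) else none).any q)
      = l.any fun a => decide (P a) && q (f a) := by
  intro l
  induction l with
  | nil => rfl
  | cons a t ih =>
    by_cases h : P a
    · simp [h, ih]
    · simp [h, ih]

lemma pvCanMove_eq (n m r1 c1 : Int) (b : List (List Int)) :
    ((pvMoves n m r1 c1).any fun p => pvCell b p.1 p.2 == 1) = pvCanMove n m r1 c1 b := by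
  unfold pvMoves pvCanMove
  rw [pvAny_filterMap (fun d : Int × Int =>
    0 ≤ r1 + d.1 ∧ r1 + d.1 < n ∧ 0 ≤ c1 + d.2 ∧ c1 + d.2 < m)
    (fun d : Int × Int => (r1 + d.1, c1 + d.2)) (fun p => pvCell b p.1 p.2 == 1) pvDirs]

lemma pvMin_append (ws : List Int) (t : Int) :
    PySem.List.min? (ws ++ [t]) (fun x => x) =
      some (match PySem.List.min? ws (fun x => x) with
            | none => t
            | some w => min w t) := by
  cases ws with
  | nil =>
    have h0 : PySem.List.min? ([] : List Int) (fun x => x) = none := rfl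
    simp [PySem.List.min?_id_cons, h0]
  | cons w ws' =>
    rw [List.cons_append, PySem.List.min?_id_cons, PySem.List.min?_id_cons,
      List.foldl_append]
    simp only [List.foldl_cons, List.foldl_nil]

lemma pvMax_append (ls : List Int) (t : Int) :
    PySem.List.max? (ls ++ [t]) (fun x => x) =
      some (match PySem.List.max? ls (fun x => x) with
            | none => t
            | some l => max l t) := by
  cases ls with
  | nil =>
    have h0 : PySem.List.max? ([] : List Int) (fun x => x) = none := rfl
    simp [PySem.List.max?_id_cons, h0]
  | cons l ls' =>
    rw [List.cons_append, PySem.List.max?_id_cons, PySem.List.max?_id_cons,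
      List.foldl_append]
    simp only [List.foldl_cons, List.foldl_nil]

-- the value A computes on a state, with canonical fuel
def pvSemA (n m r1 c1 r2 c2 : Int) (b : List (List Int)) : Bool × Int :=
  (pvDfsA (pvNz b + 1) n m r1 c1 r2 c2 b).1

def pvMemoInv (n m : Int) (memo : pvMemo) : Prop :=
  ∀ k v, PySem.Dict.get? memo k = some v →
    pvRect n m k.1 ∧ pv01 k.1 ∧ pvInR n m k.2.1 k.2.2.1 ∧ pvInR n m k.2.2.2.1 k.2.2.2.2 ∧
    v = pvSemA n m k.2.1 k.2.2.1 k.2.2.2.1 k.2.2.2.2 k.1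

lemma pvMemoInv_insert {n m : Int} {memo : pvMemo} (hM : pvMemoInv n m memo)
    {r1 c1 r2 c2 : Int} {b : List (List Int)} {v : Bool × Int}
    (hR : pvRect n m b) (h01 : pv01 b) (hI1 : pvInR n m r1 c1) (hI2 : pvInR n m r2 c2)
    (hv : v = pvSemA n m r1 c1 r2 c2 b) :
    pvMemoInv n m (PySem.Dict.insert memo (b, r1, c1, r2, c2) v) := by
  intro k w hk
  rw [PySem.Dict.get?_insert] at hk
  by_cases hke : k = (b, r1, c1, r2, c2)
  · rw [if_pos hke] at hk
    subst hke
    cases hk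
    exact ⟨hR, h01, hI1, hI2, hv⟩
  · rw [if_neg hke] at hk
    exact hM k w hk

set_option maxHeartbeats 1600000 in
lemma pvDfsB_master : ∀ (fuel : Nat) {n m r1 c1 r2 c2 : Int} {b : List (List Int)}
    {memo : pvMemo},
    pvRect n m b → pv01 b → pvInR n m r1 c1 → pvInR n m r2 c2 → pvNz b < fuel →
    pvMemoInv n m memo →
    (pvDfsB fuel n m b r1 c1 r2 c2 memo).1 = (pvDfsA fuel n m r1 c1 r2 c2 b).1 ∧
    pvMemoInv n m (pvDfsB fuel n m b r1 c1 r2 c2 memo).2 := by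
  intro fuel
  induction fuel with
  | zero => intro n m r1 c1 r2 c2 b memo _ _ _ _ hf _; omega
  | succ fuel ih =>
    intro n m r1 c1 r2 c2 b memo hR h01 hI1 hI2 hf hM
    have hstable : pvDfsA (pvNz b + 1) n m r1 c1 r2 c2 b
        = pvDfsA (fuel + 1) n m r1 c1 r2 c2 b :=
      pvDfsA_stable (fuel + 1) (pvNz b + 1) hR h01 hI1 hI2 hf (by omega)
    cases hget : PySem.Dict.get? memo (b, r1, c1, r2, c2) with
    | some v =>
      rw [pvDfsB_hit fuel hget]
      obtain ⟨_, _, _, _, hv⟩ := hM _ _ hget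
      refine ⟨?_, hM⟩
      show v = _
      rw [hv]
      show (pvDfsA (pvNz b + 1) n m r1 c1 r2 c2 b).1 = _
      rw [hstable]
    | none =>
      by_cases hguard0 : (!((pvMoves n m r1 c1).any fun p => pvCell b p.1 p.2 == 1) ||
          (pvCell b r1 c1 == 0)) = true
      · have hguardA : (!(pvCanMove n m r1 c1 b) || (pvCell b r1 c1 == 0)) = true := by
          rw [← pvCanMove_eq]; exact hguard0
        rw [pvDfsB_miss_stop fuel hget hguard0]
        have hval : ((false, 0) : Bool × Int) = (pvDfsA (fuel + 1) n m r1 c1 r2 c2 b).1 := by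
          rw [pvDfsA_succ, if_pos hguardA]
        refine ⟨hval, ?_⟩
        exact pvMemoInv_insert hM hR h01 hI1 hI2 (by unfold pvSemA; rw [hstable, ← hval])
      · have hguardA : ¬((!(pvCanMove n m r1 c1 b) || (pvCell b r1 c1 == 0)) = true) := by
          rw [← pvCanMove_eq]; exact hguard0
        rw [pvDfsB_miss_go fuel hget hguard0]
        have h1 := pvGuardCell1 hR h01 hI1 hguardA
        obtain ⟨hR1, h011, hNz1⟩ := pvMoveFacts hR h01 hI1 h1
        have hres := pvSetCell_restore hR hI1 h1
        have aux : ∀ (l : List (Int × Int)) (stA : List Int × List Int × List (List Int))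
            (stB : Option Int × Option Int × pvMemo),
            stA.2.2 = b →
            stB.1 = PySem.List.min? stA.1 (fun x => x) →
            stB.2.1 = PySem.List.max? stA.2.1 (fun x => x) →
            pvMemoInv n m stB.2.2 →
            (List.foldl (pvStepB fuel n m b (pvSetCell b r1 c1 0) r2 c2) stB
                (l.filterMap fun d =>
                  if 0 ≤ r1 + d.1 ∧ r1 + d.1 < n ∧ 0 ≤ c1 + d.2 ∧ c1 + d.2 < m then
                    some (r1 + d.1, c1 + d.2) else none)).1
              = PySem.List.min? (List.foldl (pvStepA fuel n m r1 c1 r2 c2) stA l).1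
                  (fun x => x) ∧
            (List.foldl (pvStepB fuel n m b (pvSetCell b r1 c1 0) r2 c2) stB
                (l.filterMap fun d =>
                  if 0 ≤ r1 + d.1 ∧ r1 + d.1 < n ∧ 0 ≤ c1 + d.2 ∧ c1 + d.2 < m then
                    some (r1 + d.1, c1 + d.2) else none)).2.1
              = PySem.List.max? (List.foldl (pvStepA fuel n m r1 c1 r2 c2) stA l).2.1
                  (fun x => x) ∧
            pvMemoInv n m (List.foldl (pvStepB fuel n m b (pvSetCell b r1 c1 0) r2 c2) stB
                (l.filterMap fun d =>
                  if 0 ≤ r1 + d.1 ∧ r1 + d.1 < n ∧ 0 ≤ c1 + d.2 ∧ c1 + d.2 < m then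
                    some (r1 + d.1, c1 + d.2) else none)).2.2 ∧
            (List.foldl (pvStepA fuel n m r1 c1 r2 c2) stA l).2.2 = b := by
          intro l
          induction l with
          | nil => intro stA stB h1' h2 h3 h4; exact ⟨h2.symm ▸ rfl, h3.symm ▸ rfl, h4, h1'⟩
          | cons d t iht =>
            intro stA stB hb hmin hmax hMB
            rw [List.filterMap_cons]
            by_cases hd : 0 ≤ r1 + d.1 ∧ r1 + d.1 < n ∧ 0 ≤ c1 + d.2 ∧ c1 + d.2 < m
            · rw [if_pos hd]
              simp only [List.foldl_cons]
              have hIm : pvInR n m (r1 + d.1) (c1 + d.2) :=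
                ⟨hd.1, hd.2.1, hd.2.2.1, hd.2.2.2⟩
              rcases pv01_cell hR h01 hIm with hz | ho
              · -- cell 0: both skip
                have hskipA : (!(decide (0 ≤ r1 + d.1 ∧ r1 + d.1 < n ∧ 0 ≤ c1 + d.2 ∧
                    c1 + d.2 < m)) || (pvCell stA.2.2 (r1 + d.1) (c1 + d.2) == 0)) = true := by
                  rw [hb, hz]; simp
                rw [pvStepA_skip fuel r2 c2 hskipA]
                rw [pvStepB_skip fuel _ r2 c2 (by rw [hz]; decide)]
                exact iht stA stB hb hmin hmax hMB
              · -- cell 1: both recurse, on the same board pvSetCell b r1 c1 0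
                have hskipA : ¬((!(decide (0 ≤ r1 + d.1 ∧ r1 + d.1 < n ∧ 0 ≤ c1 + d.2 ∧
                    c1 + d.2 < m)) || (pvCell stA.2.2 (r1 + d.1) (c1 + d.2) == 0)) = true) := by
                  rw [hb, ho]
                  simp [hd]
                rw [pvStepA_go fuel r2 c2 hskipA]
                rw [pvStepB_go fuel _ r2 c2 (by rw [ho]; rfl)]
                rw [hb]
                have hrec := ih (b := pvSetCell b r1 c1 0) (memo := stB.2.2) hR1 h011 hI2 hIm
                  (by omega) hMB
                rw [hrec.1]
                have hpure := pvDfsA_pure fuel (b := pvSetCell b r1 c1 0) hR1 h011 hI2 hIm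
                  (by omega)
                by_cases hw : (pvDfsA fuel n m r2 c2 (r1 + d.1) (c1 + d.2)
                    (pvSetCell b r1 c1 0)).1.1 = true
                · rw [if_pos hw, if_pos hw]
                  refine iht _ _ ?_ hmin ?_ hrec.2
                  · show pvSetCell _ r1 c1 1 = b
                    rw [hpure]; exact hres
                  · show some _ = _
                    rw [pvMax_append, hmax]
                · have hw' : (pvDfsA fuel n m r2 c2 (r1 + d.1) (c1 + d.2)
                      (pvSetCell b r1 c1 0)).1.1 = false := by
                    revert hw; cases (pvDfsA fuel n m r2 c2 (r1 + d.1) (c1 + d.2)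
                      (pvSetCell b r1 c1 0)).1.1 <;> simp
                  rw [hw', if_neg Bool.false_ne_true, if_neg Bool.false_ne_true]
                  refine iht _ _ ?_ ?_ hmax hrec.2
                  · show pvSetCell _ r1 c1 1 = b
                    rw [hpure]; exact hres
                  · show some _ = _
                    rw [pvMin_append, hmin]
            · rw [if_neg hd]
              have hskipA : (!(decide (0 ≤ r1 + d.1 ∧ r1 + d.1 < n ∧ 0 ≤ c1 + d.2 ∧
                  c1 + d.2 < m)) || (pvCell stA.2.2 (r1 + d.1) (c1 + d.2) == 0)) = true := by
                simp [hd]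
              simp only [List.foldl_cons]
              rw [pvStepA_skip fuel r2 c2 hskipA]
              exact iht stA stB hb hmin hmax hMB
        obtain ⟨hminF, hmaxF, hMF, _⟩ := aux pvDirs ([], [], b) (none, none, memo)
          rfl rfl rfl hM
        have hmain : pvOutB (List.foldl (pvStepB fuel n m b (pvSetCell b r1 c1 0) r2 c2)
            (none, none, memo) (pvMoves n m r1 c1))
            = (pvDfsA (fuel + 1) n m r1 c1 r2 c2 b).1 := by
          unfold pvOutB pvMoves
          rw [pvDfsA_succ, if_neg hguardA]
          rw [hminF, hmaxF]
          cases hSA1 : (List.foldl (pvStepA fuel n m r1 c1 r2 c2) ([], [], b) pvDirs).1 with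
          | nil =>
            rw [show (List.isEmpty ([] : List Int)) = true from rfl]
            rw [show (!true) = false from rfl, if_neg Bool.false_ne_true]
            rfl
          | cons w ws =>
            rw [show (List.isEmpty (w :: ws)) = false from rfl]
            rw [show (!false) = true from rfl, if_pos rfl]
            rw [PySem.List.min?_id_cons]
            rfl
        refine ⟨hmain, ?_⟩
        exact pvMemoInv_insert hMF hR h01 hI1 hI2 (by unfold pvSemA; rw [hstable, ← hmain])

-- ===== VERDICT (by name: the statement is the Claim_ definition above) =====
theorem solution_spec : Claim_equal_solution := by
  intro board aloc bloc _ hpre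
  obtain ⟨hne, hla, hlb, hcase⟩ := hpre
  unfold Spec_solution
  simp only [solution, solution_alt]
  have hm0 : PySem.List.pyGetD board 0 ([] : List Int) = board.headD [] := by
    rw [PySem.List.pyGetD_zero]
    cases board with
    | nil => exact absurd rfl hne
    | cons r t => rfl
  rw [hm0, PySem.List.pyGetD_zero aloc 0, PySem.List.pyGetD_ofNat' aloc 1 0,
    PySem.List.pyGetD_zero bloc 0, PySem.List.pyGetD_ofNat' bloc 1 0]
  have hempty : PySem.Dict.get? (PySem.Dict.empty :
      PySem.Dict (List (List Int) × Int × Int × Int × Int) (Bool × Int))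
      (board, aloc.getD 0 0, aloc.getD 1 0, bloc.getD 0 0, bloc.getD 1 0) = none :=
    PySem.Dict.get?_empty _
  rcases hcase with ⟨h1, h2, h3, h4⟩ | ⟨hrows, h01', ha0, ha0', ha1, ha1', hb0, hb0', hb1, hb1'⟩
  · -- no neighbour of the first start square is on the board: both sides stop at once
    have h1' : ¬(0 ≤ aloc.getD 0 0 + -1 ∧ aloc.getD 0 0 + -1 < (board.length : Int) ∧
        0 ≤ aloc.getD 1 0 + 0 ∧ aloc.getD 1 0 + 0 < ((board.headD []).length : Int)) := by omega
    have h2' : ¬(0 ≤ aloc.getD 0 0 + 1 ∧ aloc.getD 0 0 + 1 < (board.length : Int) ∧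
        0 ≤ aloc.getD 1 0 + 0 ∧ aloc.getD 1 0 + 0 < ((board.headD []).length : Int)) := by omega
    have h3' : ¬(0 ≤ aloc.getD 0 0 + 0 ∧ aloc.getD 0 0 + 0 < (board.length : Int) ∧
        0 ≤ aloc.getD 1 0 + -1 ∧ aloc.getD 1 0 + -1 < ((board.headD []).length : Int)) := by omega
    have h4' : ¬(0 ≤ aloc.getD 0 0 + 0 ∧ aloc.getD 0 0 + 0 < (board.length : Int) ∧
        0 ≤ aloc.getD 1 0 + 1 ∧ aloc.getD 1 0 + 1 < ((board.headD []).length : Int)) := by omega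
    have hcm : pvCanMove (board.length : Int) ((board.headD []).length : Int)
        (aloc.getD 0 0) (aloc.getD 1 0) board = false := by
      simp only [pvCanMove, pvDirs, List.any_cons, List.any_nil,
        decide_eq_false h1', decide_eq_false h2', decide_eq_false h3', decide_eq_false h4',
        Bool.false_and, Bool.or_self]
    have hgB : (!((pvMoves (board.length : Int) ((board.headD []).length : Int)
        (aloc.getD 0 0) (aloc.getD 1 0)).any fun p => pvCell board p.1 p.2 == 1) ||
        (pvCell board (aloc.getD 0 0) (aloc.getD 1 0) == 0)) = true := by
      rw [pvCanMove_eq, hcm]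
      simp
    rw [pvDfsA_succ, hcm, pvDfsB_miss_stop board.flatten.length hempty hgB]
    simp
  · -- rectangular 0/1 board, both start positions on it: the memoized pure search agrees
    have hR : pvRect (board.length : Int) ((board.headD []).length : Int) board := by
      refine ⟨rfl, ?_⟩
      intro row hrow
      exact_mod_cast hrows row hrow
    have hIa : pvInR (board.length : Int) ((board.headD []).length : Int)
        (aloc.getD 0 0) (aloc.getD 1 0) := ⟨ha0, ha0', ha1, ha1'⟩
    have hIb : pvInR (board.length : Int) ((board.headD []).length : Int)
        (bloc.getD 0 0) (bloc.getD 1 0) := ⟨hb0, hb0', hb1, hb1'⟩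
    have hMempty : pvMemoInv (board.length : Int) ((board.headD []).length : Int)
        PySem.Dict.empty := by
      intro k v h
      rw [PySem.Dict.get?_empty] at h
      cases h
    have hfuel : pvNz board < board.flatten.length + 1 := by
      have := pvNz_le_flatten board
      omega
    have H := pvDfsB_master (board.flatten.length + 1) hR h01' hIa hIb hfuel hMempty
    rw [H.1]
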